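-- pv_equiv track=rewrite | github.com/SESCNCFUARTYOM/Algorithm | HW-5.py | build
-- ===== SOURCE A (Python) =====
-- def calc(prog, val):
--     acc = val
--     for i in prog:
--         if i == '1':
--             acc += 2
--         elif i == '2':
--             acc *= 3
--     return acc
--
-- def build(start, stop):
--     for i in '*12':
--         for j in '*12':
--             for k in '*12':
--                 for l in '*12':
--                     for m in '*12':
--                         program = "".join([i, j, k, l, m])
--                         result = calc(program, start)
--                         if result == stop:
--                             return program.replace("*", "")
--     return None
-- ===== SOURCE B (Python) =====
-- def build(start, stop):
--     # DFS over the 5 slots, trying '*' (no-op), '1' (+2), '2' (*3) in order;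
--     # the accumulated value and the stripped program string are carried along.
--     def dfs(remaining, val, prog):
--         if remaining == 0:
--             return prog if val == stop else None
--         r = dfs(remaining - 1, val, prog)
--         if r is not None:
--             return r
--         r = dfs(remaining - 1, val + 2, prog + "1")
--         if r is not None:
--             return r
--         return dfs(remaining - 1, val * 3, prog + "2")
--     return dfs(5, start, "")
-- ===== Notes on version B (the rewrite author's own statement) =====
-- stated objective: alternative
-- what changed: Replaced the five hard-coded nested for-loops that join a candidate string and re-run calc from scratch on each of the 243 candidates with a recursive DFS that carries the accumulated value and the already-stripped program string, extending both incrementally at each level.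
import Mathlib
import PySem

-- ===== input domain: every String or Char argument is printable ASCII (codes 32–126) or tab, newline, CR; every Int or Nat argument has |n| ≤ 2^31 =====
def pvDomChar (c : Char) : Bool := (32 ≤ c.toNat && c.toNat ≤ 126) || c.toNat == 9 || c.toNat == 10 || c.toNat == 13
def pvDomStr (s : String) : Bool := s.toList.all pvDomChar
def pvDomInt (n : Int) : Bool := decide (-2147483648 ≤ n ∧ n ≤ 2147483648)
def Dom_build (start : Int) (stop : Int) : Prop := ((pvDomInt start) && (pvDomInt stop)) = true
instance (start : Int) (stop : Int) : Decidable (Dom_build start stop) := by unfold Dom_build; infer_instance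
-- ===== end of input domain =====

-- B replaces A's five hard-coded nested loops by a recursive DFS carrying the accumulated
-- value and the stripped program string, so the value is extended incrementally instead of
-- recomputed from scratch per candidate (objective: alternative decomposition).

-- ===== PORT A =====
-- calc(prog, val): fold over the characters of prog
def calcA (prog : String) (val : Int) : Int :=
  prog.toList.foldl
    (fun acc i => if i = '1' then acc + 2 else if i = '2' then acc * 3 else acc) val

-- 'for c in "*12": …; return on first hit' — first some result, in loop order
def firstSome (cs : List Char) (f : Char → Option String) : Option String :=
  match cs with
  | [] => none
  | c :: rest =>
    match f c with
    | some r => some r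
    | none => firstSome rest f

def build (start : Int) (stop : Int) : Option String :=
  firstSome ['*', '1', '2'] fun i =>
    firstSome ['*', '1', '2'] fun j =>
      firstSome ['*', '1', '2'] fun k =>
        firstSome ['*', '1', '2'] fun l =>
          firstSome ['*', '1', '2'] fun m =>
            -- "".join of five 1-char strings = the 5-char string (exact)
            let program := String.ofList [i, j, k, l, m]
            let result := calcA program start
            if result = stop then some (PySem.Str.replace program "*" "") else none

-- ===== PORT B =====
def build_dfs (stop : Int) : Nat → Int → String → Option String
  | 0, val, prog => if val = stop then some prog else none
  | n + 1, val, prog =>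
    match build_dfs stop n val prog with
    | some r => some r
    | none =>
      match build_dfs stop n (val + 2) (prog ++ "1") with
      | some r => some r
      | none => build_dfs stop n (val * 3) (prog ++ "2")

def build_alt (start : Int) (stop : Int) : Option String :=
  build_dfs stop 5 start ""

-- ===== PRECONDITION & SPEC =====
def Spec_build (start : Int) (stop : Int) (out : Option String) : Prop := out = build_alt start stop
instance (start : Int) (stop : Int) (out : Option String) : Decidable (Spec_build start stop out) := by unfold Spec_build; infer_instance

-- ===== CLAIM (what is proved, stated in full; the proofs are below) =====
def Claim_equal_build : Prop := ∀ (start : Int) (stop : Int), Dom_build start stop → Spec_build start stop (build start stop)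

-- ===== LEMMAS AND PROOFS =====

theorem firstSome_cons (c : Char) (cs : List Char) (f : Char → Option String) :
    firstSome (c :: cs) f = (f c).or (firstSome cs f) := by
  cases h : f c <;> simp [firstSome, h, Option.or]

theorem firstSome_nil (f : Char → Option String) : firstSome [] f = none := rfl

theorem build_dfs_succ (stop : Int) (n : Nat) (val : Int) (prog : String) :
    build_dfs stop (n+1) val prog =
      (build_dfs stop n val prog).or
        ((build_dfs stop n (val + 2) (prog ++ "1")).or (build_dfs stop n (val * 3) (prog ++ "2"))) := by
  cases h1 : build_dfs stop n val prog <;> cases h2 : build_dfs stop n (val + 2) (prog ++ "1") <;>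
    simp [build_dfs, h1, h2, Option.or]

-- ===== VERDICT (by name: the statement is the Claim_ definition above) =====
theorem build_spec : Claim_equal_build := by
  intro start stop _
  show build start stop = build_alt start stop
  simp only [build, build_alt, firstSome_cons, firstSome_nil, build_dfs_succ, Option.or_none]
  rfl
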